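-- pv_equiv track=rewrite | github.com/mtiepelt/ramstake-failure-attack | stagedPartitioning.py | completePartsFromFindPeaks
-- ===== SOURCE A (Python) =====
-- def completePartsFromFindPeaks(peaks, peak_look_ahead):
--     """
--         return [START, END, e]
--     """
--     lst_peaks = list(peaks)
--     lst_peaks.sort()
--     bit_range = []
--
--     """
--
--     """
--     i = 0
--     while i < len(lst_peaks):
--
--         peak = lst_peaks[i]
--         first_peak = lst_peaks[i]
--
--         """
--             Identify close peaks
--         """
--         i += 1
--         while i < len(lst_peaks) and (peak + peak_look_ahead) > lst_peaks[i]: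
--             peak = lst_peaks[i]
--             i += 1
--         # lst_peak[i] is not close
--
--         # [START, END, EMPTY DISTANCE]
--         if i >= len(lst_peaks):
--             # last peak. take distance to first part
--             bit_range.append([first_peak, peak, modulus_bitlength - peak + lst_peaks[0]])
--         else:
--             bit_range.append([first_peak, peak, lst_peaks[i] - peak])
--
--     return bit_range
--
-- modulus_bitlength = 756839
-- ===== SOURCE B (Python) =====
-- modulus_bitlength = 756839
--
-- def completePartsFromFindPeaks(peaks, peak_look_ahead):
--     """return [START, END, e] — staged: filter adjacent pairs into the
--     starts/ends/gaps columns independently, then zip the columns."""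
--     s = sorted(peaks)
--     if not s:
--         return []
--     pairs = list(zip(s, s[1:]))
--     starts = [s[0]] + [cur for prev, cur in pairs if cur - prev >= peak_look_ahead]
--     ends = [prev for prev, cur in pairs if cur - prev >= peak_look_ahead] + [s[-1]]
--     gaps = [nx - b for b, nx in zip(ends, starts[1:])] + [modulus_bitlength - s[-1] + s[0]]
--     return [[a, b, g] for a, b, g in zip(starts, ends, gaps)]
-- ===== Notes on version B (the rewrite author's own statement) =====
-- stated objective: alternative
-- what changed: Instead of A's nested index-based while loops that append one triple per outer iteration, B builds the starts, ends and gaps columns independently by filtering the adjacent-pair list zip(s, s[1:]) on gap >= look_ahead (plus the wrap-around tail entry) and then zips the three columns into triples.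
import Mathlib
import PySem

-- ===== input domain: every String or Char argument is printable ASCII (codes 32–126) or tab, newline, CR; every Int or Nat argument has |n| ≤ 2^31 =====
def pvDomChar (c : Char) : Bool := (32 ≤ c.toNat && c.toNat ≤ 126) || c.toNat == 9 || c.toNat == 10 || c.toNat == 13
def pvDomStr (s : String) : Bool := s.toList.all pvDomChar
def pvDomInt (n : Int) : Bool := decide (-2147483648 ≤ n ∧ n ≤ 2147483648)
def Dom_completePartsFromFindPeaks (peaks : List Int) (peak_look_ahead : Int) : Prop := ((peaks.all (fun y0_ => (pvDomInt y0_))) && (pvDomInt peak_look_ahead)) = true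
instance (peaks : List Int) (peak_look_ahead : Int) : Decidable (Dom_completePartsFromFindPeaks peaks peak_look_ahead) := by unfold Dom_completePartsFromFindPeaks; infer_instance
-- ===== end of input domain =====

-- B replaces A's nested index-chasing while loops (which append one triple per outer step)
-- by staged column construction: filter the adjacent-pair list into independent starts/ends/gaps
-- columns, then zip the columns into triples (objective: alternative decomposition).

-- ===== PORT A =====
-- inner while: advance while the next peak is close; returns (peak, remaining suffix)
def pvA_inner (la : Int) : Int → List Int → Int × List Int
  | peak, [] => (peak, [])
  | peak, x :: rest => if peak + la > x then pvA_inner la x rest else (peak, x :: rest)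

-- needed by pvA_outer's termination proof
theorem pvA_inner_len (la peak : Int) (xs : List Int) :
    (pvA_inner la peak xs).2.length ≤ xs.length := by
  induction xs generalizing peak with
  | nil => simp [pvA_inner]
  | cons x rest ih =>
    simp only [pvA_inner]
    split
    · exact le_trans (ih x) (Nat.le_succ _)
    · simp

-- outer while over the sorted list (first0 = lst_peaks[0])
def pvA_outer (la first0 : Int) : List Int → List (List Int)
  | [] => []
  | p :: rest =>
    let pr := pvA_inner la p rest
    if h : pr.2 = [] then [[p, pr.1, 756839 - pr.1 + first0]]
    else [p, pr.1, pr.2.head h - pr.1] :: pvA_outer la first0 pr.2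
termination_by xs => xs.length
decreasing_by
  have := pvA_inner_len la p rest
  simp only [List.length_cons]
  omega

def completePartsFromFindPeaks (peaks : List Int) (peak_look_ahead : Int) : List (List Int) :=
  match PySem.List.sorted peaks (fun x => x) false with
  | [] => []
  | p :: rest => pvA_outer peak_look_ahead p (p :: rest)

-- ===== PORT B =====
-- pairs = zip(s, s[1:]); starts/ends/gaps are independent comprehensions over pairs; zip the columns
def completePartsFromFindPeaks_alt (peaks : List Int) (peak_look_ahead : Int) : List (List Int) :=
  match PySem.List.sorted peaks (fun x => x) false with
  | [] => []
  | p :: rest =>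
    let pairs := List.zip (p :: rest) (PySem.List.slice (p :: rest) (some 1) none)
    let lastv := (p :: rest).getLast (List.cons_ne_nil _ _)
    let starts := p :: (pairs.filter (fun t => decide (t.2 - t.1 ≥ peak_look_ahead))).map Prod.snd
    let ends := (pairs.filter (fun t => decide (t.2 - t.1 ≥ peak_look_ahead))).map Prod.fst ++ [lastv]
    let gaps := (List.zip ends (starts.drop 1)).map (fun t => t.2 - t.1) ++ [756839 - lastv + p]
    (List.zip starts (List.zip ends gaps)).map (fun t => [t.1, t.2.1, t.2.2])

-- ===== PRECONDITION & SPEC =====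
def Spec_completePartsFromFindPeaks (peaks : List Int) (peak_look_ahead : Int) (out : List (List Int)) : Prop := out = completePartsFromFindPeaks_alt peaks peak_look_ahead
instance (peaks : List Int) (peak_look_ahead : Int) (out : List (List Int)) : Decidable (Spec_completePartsFromFindPeaks peaks peak_look_ahead out) := by unfold Spec_completePartsFromFindPeaks; infer_instance

-- ===== CLAIM (what is proved, stated in full; the proofs are below) =====
def Claim_equal_completePartsFromFindPeaks : Prop := ∀ (peaks : List Int) (peak_look_ahead : Int), Dom_completePartsFromFindPeaks peaks peak_look_ahead → Spec_completePartsFromFindPeaks peaks peak_look_ahead (completePartsFromFindPeaks peaks peak_look_ahead)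

-- ===== LEMMAS AND PROOFS =====

-- A's outer-loop body generalized so the run start is an explicit parameter
def pvBody (la first0 start prev : Int) (xs : List Int) : List (List Int) :=
  let pr := pvA_inner la prev xs
  if h : pr.2 = [] then [[start, pr.1, 756839 - pr.1 + first0]]
  else [start, pr.1, pr.2.head h - pr.1] :: pvA_outer la first0 pr.2

-- the filtered adjacent-pair list from intermediate state
def pvF (la prev : Int) (xs : List Int) : List (Int × Int) :=
  (List.zip (prev :: xs) xs).filter (fun t => decide (t.2 - t.1 ≥ la))

-- B's columns-then-zip result from intermediate state
def pvEmit (la first0 start prev : Int) (xs : List Int) : List (List Int) :=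
  let F := pvF la prev xs
  let lastv := (prev :: xs).getLast (List.cons_ne_nil _ _)
  let starts := start :: F.map Prod.snd
  let ends := F.map Prod.fst ++ [lastv]
  let gaps := (List.zip ends (starts.drop 1)).map (fun t => t.2 - t.1) ++ [756839 - lastv + first0]
  (List.zip starts (List.zip ends gaps)).map (fun t => [t.1, t.2.1, t.2.2])

theorem pvA_outer_cons (la first0 p : Int) (rest : List Int) :
    pvA_outer la first0 (p :: rest) = pvBody la first0 p p rest := by
  rw [pvA_outer, pvBody]

theorem pvMain (la first0 : Int) : ∀ (xs : List Int) (start prev : Int),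
    pvBody la first0 start prev xs = pvEmit la first0 start prev xs := by
  intro xs
  induction xs with
  | nil =>
    intro start prev
    simp [pvBody, pvEmit, pvF, pvA_inner]
  | cons cur rest ih =>
    intro start prev
    by_cases hc : prev + la > cur
    · have hb : ¬ (cur - prev ≥ la) := by omega
      have h1 : pvBody la first0 start prev (cur :: rest) = pvBody la first0 start cur rest := by
        simp only [pvBody, pvA_inner, if_pos hc]
      have h2 : pvEmit la first0 start prev (cur :: rest) = pvEmit la first0 start cur rest := by
        simp only [pvEmit, pvF, List.zip_cons_cons, List.filter_cons,
          List.getLast_cons (List.cons_ne_nil _ _)]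
        simp [hb]
      rw [h1, h2, ih]
    · have hb : cur - prev ≥ la := by omega
      have h1 : pvBody la first0 start prev (cur :: rest)
          = [start, prev, cur - prev] :: pvA_outer la first0 (cur :: rest) := by
        simp only [pvBody, pvA_inner, if_neg hc]
        simp
      have h2 : pvEmit la first0 start prev (cur :: rest)
          = [start, prev, cur - prev] :: pvEmit la first0 cur cur rest := by
        simp only [pvEmit, pvF, List.zip_cons_cons, List.filter_cons,
          List.getLast_cons (List.cons_ne_nil _ _)]
        simp [hb]
      rw [h1, h2, pvA_outer_cons, ih]

-- ===== VERDICT (by name: the statement is the Claim_ definition above) =====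
theorem completePartsFromFindPeaks_spec : Claim_equal_completePartsFromFindPeaks := by
  intro peaks la _
  unfold Spec_completePartsFromFindPeaks completePartsFromFindPeaks completePartsFromFindPeaks_alt
  cases h : PySem.List.sorted peaks (fun x => x) false with
  | nil => rfl
  | cons p rest =>
    simp only [PySem.List.slice_from_one, List.tail_cons]
    rw [pvA_outer_cons, pvMain]
    rfl
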